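-- pv_equiv track=rewrite | github.com/ngl0108/Netsphere-Free | Netsphere_Free_Backend/app/services/discovery_service.py | _normalize_host_key
-- ===== SOURCE A (Python) =====
-- def _normalize_host_key(value: str) -> str:
--     s = str(value or "").strip().lower()
--     if not s:
--         return ""
--     if "." in s:
--         s = s.split(".")[0]
--     for ch in ("-", "_", " "):
--         s = s.replace(ch, "")
--     return s
-- ===== SOURCE B (Python) =====
-- def _normalize_host_key(value: str) -> str:
--     s = str(value or "").strip().lower()
--     out = []
--     for ch in s:
--         if ch == '.':
--             break
--         if ch not in '-_ ':
--             out.append(ch)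
--     return ''.join(out)
-- ===== Notes on version B (the rewrite author's own statement) =====
-- stated objective: simpler
-- what changed: Replaces the split-then-three-replace-scans (four traversals plus intermediate strings) by one explicit loop over the characters that stops at the first '.' and skips '-', '_' and ' ' while collecting the output.
import Mathlib
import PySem

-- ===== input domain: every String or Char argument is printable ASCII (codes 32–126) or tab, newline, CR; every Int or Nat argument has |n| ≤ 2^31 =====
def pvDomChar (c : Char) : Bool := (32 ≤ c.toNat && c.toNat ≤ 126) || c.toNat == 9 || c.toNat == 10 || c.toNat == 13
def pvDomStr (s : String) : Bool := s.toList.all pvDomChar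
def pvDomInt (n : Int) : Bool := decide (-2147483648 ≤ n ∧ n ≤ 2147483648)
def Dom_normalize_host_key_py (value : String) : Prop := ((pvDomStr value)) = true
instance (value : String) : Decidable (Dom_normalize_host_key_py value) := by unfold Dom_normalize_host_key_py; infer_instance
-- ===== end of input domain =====

-- B replaces A's split pass plus three replace passes by one character loop that stops at
-- the first '.' and skips '-'/'_'/' ' (objective: simpler, one pass instead of four).

-- ===== PORT A =====
def normalize_host_key_py (value : String) : String :=
  -- s = str(value or "").strip().lower()   ('value or ""' on a str is value unless it is empty)
  let v := if value == "" then "" else value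
  let s := PySem.Str.lower (PySem.Str.strip v)
  if s == "" then ""
  else
    -- if "." in s: s = s.split(".")[0]   (split of a string is never empty, so index 0 exists)
    let s := if PySem.Str.isIn "." s then (((PySem.Str.split? s ".").getD []).getD 0 "") else s
    -- for ch in ("-", "_", " "): s = s.replace(ch, "")
    (["-", "_", " "] : List String).foldl (fun acc ch => PySem.Str.replace acc ch "") s

-- ===== PORT B =====
-- the loop body of Source B: break at '.', skip '-','_',' ', collect the rest
def nhkAltLoop : List Char → List Char
  | [] => []
  | c :: rest =>
    if c == '.' then []
    else if c == '-' || c == '_' || c == ' ' then nhkAltLoop rest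
    else c :: nhkAltLoop rest

def normalize_host_key_py_alt (value : String) : String :=
  let v := if value == "" then "" else value
  let s := PySem.Str.lower (PySem.Str.strip v)
  -- ''.join(out) of the collected characters
  String.ofList (nhkAltLoop s.toList)

-- ===== PRECONDITION & SPEC =====
def Spec_normalize_host_key_py (value : String) (out : String) : Prop := out = normalize_host_key_py_alt value
instance (value : String) (out : String) : Decidable (Spec_normalize_host_key_py value out) := by unfold Spec_normalize_host_key_py; infer_instance

-- ===== CLAIM (what is proved, stated in full; the proofs are below) =====
def Claim_equal_normalize_host_key_py : Prop := ∀ (value : String), Dom_normalize_host_key_py value → Spec_normalize_host_key_py value (normalize_host_key_py value)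

-- ===== LEMMAS AND PROOFS =====

-- s.replace(c, "") for a single character is a filter
theorem nhk_replace_go_single (c : Char) : ∀ (fuel : Nat) (l acc : List Char), l.length ≤ fuel →
    PySem.Chars.replace.go [c] [] fuel l acc = acc.reverse ++ l.filter (fun x => x != c) := by
  intro fuel
  induction fuel with
  | zero =>
    intro l acc h
    have : l = [] := List.eq_nil_of_length_eq_zero (Nat.le_zero.mp h)
    subst this
    simp [PySem.Chars.replace.go]
  | succ n ih =>
    intro l acc h
    cases l with
    | nil => simp [PySem.Chars.replace.go]
    | cons x t =>
      by_cases hx : x = c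
      · subst hx
        have hpre : List.isPrefixOf [x] (x :: t) = true := by simp [List.isPrefixOf]
        rw [PySem.Chars.replace.go, if_pos hpre]
        simp only [List.length_cons] at h
        simpa using ih t acc (by omega)
      · have hpre : List.isPrefixOf [c] (x :: t) = false := by
          simp [List.isPrefixOf, BEq.beq]
          exact fun hh => hx hh.symm
        rw [PySem.Chars.replace.go, if_neg (by simp [hpre])]
        simp only [List.length_cons] at h
        rw [ih t (x :: acc) (by omega)]
        simp [hx]

theorem nhk_replace_single (c : Char) (l : List Char) :
    PySem.Chars.replace l [c] [] = l.filter (fun x => x != c) := by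
  rw [PySem.Chars.replace]
  simp only [List.isEmpty_cons, if_false, Bool.false_eq_true]
  simpa using nhk_replace_go_single c l.length l [] le_rfl

-- the first field of s.split(".") is the prefix before the first '.'
theorem nhk_split_go_head : ∀ (fuel : Nat) (l cur : List Char) (acc : List (List Char)),
    l.length ≤ fuel →
    ∃ rest, PySem.Chars.splitOn.go ['.'] fuel l cur acc
      = acc.reverse ++ (cur.reverse ++ l.takeWhile (fun x => x != '.')) :: rest := by
  intro fuel
  induction fuel with
  | zero =>
    intro l cur acc h
    have : l = [] := List.eq_nil_of_length_eq_zero (Nat.le_zero.mp h)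
    subst this
    exact ⟨[], by simp [PySem.Chars.splitOn.go.eq_def]⟩
  | succ n ih =>
    intro l cur acc h
    cases l with
    | nil => exact ⟨[], by simp [PySem.Chars.splitOn.go.eq_def]⟩
    | cons x t =>
      simp only [List.length_cons] at h
      by_cases hx : x = '.'
      · subst hx
        have hpre : List.isPrefixOf ['.'] ('.' :: t) = true := by simp [List.isPrefixOf]
        rw [PySem.Chars.splitOn.go.eq_def]
        simp only [hpre, if_true]
        obtain ⟨rest, hr⟩ := ih (List.drop 1 ('.' :: t)) [] (cur.reverse :: acc) (by simp; omega)
        refine ⟨t.takeWhile (fun x => x != '.') :: rest, ?_⟩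
        simpa using hr
      · have hpre : List.isPrefixOf ['.'] (x :: t) = false := by
          simp [List.isPrefixOf, BEq.beq]
          exact fun hh => hx hh.symm
        rw [PySem.Chars.splitOn.go.eq_def]
        simp only [hpre, Bool.false_eq_true, if_false]
        obtain ⟨rest, hr⟩ := ih t (x :: cur) acc (by omega)
        refine ⟨rest, ?_⟩
        rw [hr]; simp [hx]

theorem nhk_split_head (l : List Char) :
    (PySem.Chars.splitOn l ['.']).getD 0 [] = l.takeWhile (fun x => x != '.') := by
  rw [PySem.Chars.splitOn]
  obtain ⟨rest, hr⟩ := nhk_split_go_head (l.length + 1) l [] [] (by omega)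
  rw [hr]; simp

-- B's loop is a takeWhile-then-filter
theorem nhk_altLoop_eq (l : List Char) :
    nhkAltLoop l = (l.takeWhile (fun x => x != '.')).filter
      (fun x => !(x == '-' || x == '_' || x == ' ')) := by
  induction l with
  | nil => simp [nhkAltLoop]
  | cons x t ih =>
    rw [nhkAltLoop]
    by_cases hx : x = '.'
    · subst hx; simp
    · rw [if_neg (by simp [hx])]
      by_cases h1 : x = '-' <;> by_cases h2 : x = '_' <;> by_cases h3 : x = ' ' <;>
        simp [h1, h2, h3, hx, ih]

-- core list-level equality: A's split-then-filter pipeline equals B's loop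
theorem nhk_core (l : List Char) :
    List.filter (fun x => x != ' ')
      (List.filter (fun x => x != '_')
        (List.filter (fun x => x != '-')
          (if PySem.Chars.isIn ['.'] l then (PySem.Chars.splitOn l ['.']).getD 0 [] else l)))
      = nhkAltLoop l := by
  have hbase : (if PySem.Chars.isIn ['.'] l then (PySem.Chars.splitOn l ['.']).getD 0 [] else l)
      = l.takeWhile (fun x => x != '.') := by
    by_cases hin : PySem.Chars.isIn ['.'] l = true
    · rw [if_pos hin, nhk_split_head]
    · rw [if_neg hin]
      have hnot : '.' ∉ l := by
        intro hmem
        apply hin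
        have : ['.'] <:+: l := by
          obtain ⟨s, t, hst⟩ := List.append_of_mem hmem
          exact ⟨s, t, by rw [hst]; simp⟩
        exact (PySem.Chars.isIn_iff_infix ['.'] l).mpr this
      symm
      rw [List.takeWhile_eq_self_iff]
      intro a ha
      simp only [bne_iff_ne, ne_eq]
      intro h; subst h; exact hnot ha
  rw [hbase, nhk_altLoop_eq, List.filter_filter, List.filter_filter]
  apply List.filter_congr
  intro x _
  simp only [bne]
  by_cases h1 : (x == '-') = true <;> by_cases h2 : (x == '_') = true <;>
    by_cases h3 : (x == ' ') = true <;> simp [h1, h2, h3]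

-- s.split(".")[0] at String level equals the Chars-level first field
theorem nhk_split_toList (s : String) :
    (((PySem.Str.split? s ".").getD []).getD 0 "").toList
      = (PySem.Chars.splitOn s.toList ['.']).getD 0 [] := by
  rw [PySem.Str.split?, PySem.Chars.split?]
  rw [if_neg (by decide)]
  have hdot : ("." : String).toList = ['.'] := by decide
  rw [hdot]
  cases hsp : PySem.Chars.splitOn s.toList ['.'] with
  | nil => simp
  | cons a t => simp [String.toList_ofList]

-- ===== VERDICT (by name: the statement is the Claim_ definition above) =====
theorem normalize_host_key_py_spec : Claim_equal_normalize_host_key_py := by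
  intro value _
  unfold Spec_normalize_host_key_py
  simp only [normalize_host_key_py, normalize_host_key_py_alt]
  rw [← String.toList_inj]
  generalize PySem.Str.lower (PySem.Str.strip (if value == "" then "" else value)) = s
  by_cases hse : s = ""
  · subst hse; decide
  · rw [if_neg (by simp [hse])]
    rw [String.toList_ofList]
    simp only [List.foldl]
    rw [PySem.Str.toList_replace, PySem.Str.toList_replace, PySem.Str.toList_replace]
    have h1 : ("-" : String).toList = ['-'] := by decide
    have h2 : ("_" : String).toList = ['_'] := by decide
    have h3 : (" " : String).toList = [' '] := by decide
    have h0 : ("" : String).toList = [] := by decide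
    rw [h1, h2, h3, h0]
    rw [nhk_replace_single, nhk_replace_single, nhk_replace_single]
    rw [← nhk_core s.toList]
    congr 1
    congr 1
    congr 1
    rw [apply_ite String.toList]
    rw [PySem.Str.isIn_eq]
    have hdot : ("." : String).toList = ['.'] := by decide
    rw [hdot, nhk_split_toList]
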